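-- pv_equiv track=rewrite | github.com/ytsmacr/caipy | caipy/src/main/parallel.py | get_first_local_minimum
-- ===== SOURCE A (Python) =====
-- def get_first_local_minimum(li):
--     min = li[0]
--     for i in li[1:]:
--         if i < min:
--             min = i
--         elif i > min:
--             return min
--         elif i == min:
--             continue
--     # in case the last point is the lowest
--     return min
-- ===== SOURCE B (Python) =====
-- def get_first_local_minimum(li):
--     # A's running min always equals the previous element, so the answer is the
--     # element just before the first strict increase between neighbors (or li[-1]).
--     for a, b in zip(li, li[1:]):
--         if b > a:
--             return a
--     return li[-1]
-- ===== Notes on version B (the rewrite author's own statement) =====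
-- stated objective: simpler
-- what changed: Replaces the maintained running-minimum accumulator and three-way branch with a stateless scan of adjacent pairs returning the element before the first strict increase (or the last element).
import Mathlib
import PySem

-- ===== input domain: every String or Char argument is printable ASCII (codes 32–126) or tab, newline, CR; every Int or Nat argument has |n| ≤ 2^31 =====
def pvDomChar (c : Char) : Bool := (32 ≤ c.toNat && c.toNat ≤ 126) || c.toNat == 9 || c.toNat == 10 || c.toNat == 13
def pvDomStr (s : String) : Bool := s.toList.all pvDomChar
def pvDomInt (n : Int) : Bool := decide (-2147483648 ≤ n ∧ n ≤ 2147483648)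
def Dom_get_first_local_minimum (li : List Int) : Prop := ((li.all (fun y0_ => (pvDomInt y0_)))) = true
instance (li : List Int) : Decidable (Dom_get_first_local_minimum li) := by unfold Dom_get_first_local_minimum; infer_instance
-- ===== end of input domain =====

-- ===== PORT A =====
-- B replaces A's running-minimum accumulator with a stateless adjacent-pair scan (objective: simpler).
-- loop over li[1:] carrying the mutated `min`
def pvLoopA : Int → List Int → Int
  | m, [] => m
  | m, i :: rest =>
    if i < m then pvLoopA i rest
    else if i > m then m
    else pvLoopA m rest

def get_first_local_minimum (li : List Int) : Int :=
  match li with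
  | [] => 0        -- li[0] raises IndexError; excluded by Pre_
  | m :: rest => pvLoopA m rest

-- ===== PORT B =====
-- scan of adjacent pairs: first a with successor b > a
def pvPairScan : List Int → Option Int
  | a :: b :: rest => if b > a then some a else pvPairScan (b :: rest)
  | _ => none

def get_first_local_minimum_alt (li : List Int) : Int :=
  match pvPairScan li with
  | some a => a
  | none => ((PySem.List.pyGet? li (-1)).getD 0)   -- li[-1]; empty list excluded by Pre_

-- ===== PRECONDITION & SPEC =====
-- Pre_ excludes exactly the empty list, on which both A (li[0]) and B (li[-1]) raise IndexError.
def Pre_get_first_local_minimum (li : List Int) : Prop := li ≠ []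
instance (li : List Int) : Decidable (Pre_get_first_local_minimum li) := by unfold Pre_get_first_local_minimum; infer_instance
def pvWitness_get_first_local_minimum : List Int := [3, 1, 2]

def Spec_get_first_local_minimum (li : List Int) (out : Int) : Prop := out = get_first_local_minimum_alt li
instance (li : List Int) (out : Int) : Decidable (Spec_get_first_local_minimum li out) := by unfold Spec_get_first_local_minimum; infer_instance

-- ===== CLAIM (what is proved, stated in full; the proofs are below) =====
def Claim_equal_get_first_local_minimum : Prop := ∀ (li : List Int), Dom_get_first_local_minimum li → Pre_get_first_local_minimum li → Spec_get_first_local_minimum li (get_first_local_minimum li)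

-- ===== LEMMAS AND PROOFS =====
theorem pvLoopA_eq_alt (t : List Int) : ∀ m : Int, pvLoopA m t = get_first_local_minimum_alt (m :: t) := by
  induction t with
  | nil =>
    intro m
    simp [pvLoopA, get_first_local_minimum_alt, pvPairScan, PySem.List.pyGet?_neg_one]
  | cons i rest ih =>
    intro m
    by_cases h1 : i < m
    · have hgt : ¬ i > m := by omega
      rw [show pvLoopA m (i :: rest) = pvLoopA i rest by simp [pvLoopA, h1], ih i]
      simp [get_first_local_minimum_alt, pvPairScan, hgt, PySem.List.pyGet?_neg_one, List.getLast?]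
    · by_cases h2 : i > m
      · simp [pvLoopA, h1, h2, get_first_local_minimum_alt, pvPairScan]
      · have hem : i = m := by omega
        subst hem
        rw [show pvLoopA i (i :: rest) = pvLoopA i rest by simp [pvLoopA], ih i]
        simp [get_first_local_minimum_alt, pvPairScan, PySem.List.pyGet?_neg_one, List.getLast?]

-- ===== VERDICT (by name: the statement is the Claim_ definition above) =====
theorem get_first_local_minimum_spec : Claim_equal_get_first_local_minimum := by
  intro li _ hpre
  unfold Spec_get_first_local_minimum
  match li with
  | [] => exact absurd rfl hpre
  | m :: t => exact pvLoopA_eq_alt t m
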